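-- pv_equiv track=rewrite | github.com/Bogdan741/EilerProject | task51.py | convert
-- ===== SOURCE A (Python) =====
-- def convert(number):
--     c = 0
--     shelve = []
--     for i in number:
--         if i == '1':
--             shelve.append(c)
--         c+=1
--     return shelve
-- ===== SOURCE B (Python) =====
-- def convert(number):
--     shelve = []
--     start = 0
--     pos = number.find('1', start)
--     while pos != -1:
--         shelve.append(pos)
--         start = pos + 1
--         pos = number.find('1', start)
--     return shelve
-- ===== Notes on version B (the rewrite author's own statement) =====
-- stated objective: faster
-- what changed: Replaces the per-character Python-level counter loop with a str.find-driven scan that jumps directly from one '1' to the next using the C-level substring search.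
import Mathlib
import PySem

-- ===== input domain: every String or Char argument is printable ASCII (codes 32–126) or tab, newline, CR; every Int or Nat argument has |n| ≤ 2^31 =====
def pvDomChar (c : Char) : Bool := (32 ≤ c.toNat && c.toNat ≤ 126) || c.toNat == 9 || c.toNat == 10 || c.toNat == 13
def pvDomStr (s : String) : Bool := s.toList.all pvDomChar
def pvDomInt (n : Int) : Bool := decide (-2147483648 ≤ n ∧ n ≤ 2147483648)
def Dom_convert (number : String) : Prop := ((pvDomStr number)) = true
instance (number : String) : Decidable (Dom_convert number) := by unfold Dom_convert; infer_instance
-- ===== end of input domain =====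

-- B replaces A's per-character counter loop with a str.find-driven scan (constant-factor faster
-- in a timing run; same O(n) asymptotics).

-- ===== PORT A =====
-- for i in number: if i == '1': shelve.append(c); c += 1
def convert (number : String) : List Int :=
  (number.toList.foldl
    (fun (st : Int × List Int) (i : Char) =>
      if i = '1' then (st.1 + 1, st.2 ++ [st.1]) else (st.1 + 1, st.2))
    ((0 : Int), ([] : List Int))).2

-- ===== PORT B =====
-- while loop of Source B: pos = number.find('1', start); fuel only guarantees termination
def convertAltLoop (number : String) (fuel : Nat) (start : Nat) (shelve : List Int) : List Int :=
  match fuel with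
  | 0 => shelve
  | fuel + 1 =>
    let pos := PySem.Str.findFrom number "1" (start : Int) none
    if pos = -1 then shelve
    else convertAltLoop number fuel (pos.toNat + 1) (shelve ++ [pos])

def convert_alt (number : String) : List Int :=
  convertAltLoop number (number.toList.length + 1) 0 []

-- ===== PRECONDITION & SPEC =====
def Spec_convert (number : String) (out : List Int) : Prop := out = convert_alt number
instance (number : String) (out : List Int) : Decidable (Spec_convert number out) := by unfold Spec_convert; infer_instance

-- ===== CLAIM (what is proved, stated in full; the proofs are below) =====
def Claim_equal_convert : Prop := ∀ (number : String), Dom_convert number → Spec_convert number (convert number)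

-- ===== LEMMAS AND PROOFS =====

/-- indices (counted from `k`) of the `'1'` characters of a list -/
def specOnes : List Char → Int → List Int
  | [], _ => []
  | c :: t, k => if c = '1' then k :: specOnes t (k + 1) else specOnes t (k + 1)

theorem aFold (l : List Char) : ∀ (c : Int) (sh : List Int),
    (l.foldl
      (fun (st : Int × List Int) (i : Char) =>
        if i = '1' then (st.1 + 1, st.2 ++ [st.1]) else (st.1 + 1, st.2))
      (c, sh)).2 = sh ++ specOnes l c := by
  induction l with
  | nil => intro c sh; simp [specOnes]
  | cons hd tl ih =>
      intro c sh
      by_cases h : hd = '1' <;> simp [specOnes, h, ih]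

theorem mem_infix_single {a : Char} {t : List Char} (h : a ∈ t) : [a] <:+: t := by
  rcases List.append_of_mem h with ⟨t1, t2, rfl⟩
  exact ⟨t1, t2, by simp⟩

theorem specOnes_of_no_one {t : List Char} (h : '1' ∉ t) : ∀ k, specOnes t k = [] := by
  induction t with
  | nil => intro k; rfl
  | cons hd tl ih =>
      intro k
      have h1 : hd ≠ '1' := fun he => h (he ▸ List.mem_cons_self)
      simp [specOnes, h1, ih (fun hm => h (List.mem_cons_of_mem _ hm))]

theorem specOnes_split : ∀ (t : List Char) (j : Nat) (k : Int),
    ['1'] <+: t.drop j → (∀ i < j, ¬ ['1'] <+: t.drop i) →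
    specOnes t k = (k + j) :: specOnes (t.drop (j + 1)) (k + j + 1) := by
  intro t
  induction t with
  | nil => intro j k hp _; simp at hp
  | cons hd tl ih =>
      intro j k hp hmin
      cases j with
      | zero =>
          rcases hp with ⟨r, hr⟩
          simp at hr
          obtain ⟨h1, -⟩ := hr
          simp [specOnes, h1.symm]
      | succ j' =>
          have h0 : hd ≠ '1' := by
            intro he
            exact hmin 0 (Nat.succ_pos _) ⟨tl, by simp [he]⟩
          have hrec := ih j' (k + 1) (by simpa using hp)
            (fun i hi => by simpa using hmin (i + 1) (Nat.succ_lt_succ hi))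
          simp only [specOnes, h0, if_false, List.drop_succ_cons, hrec]
          have e1 : k + 1 + (j' : ℤ) = k + ((j' : ℤ) + 1) := by ring
          push_cast
          rw [e1]

theorem bLoop_eq (s : String) : ∀ (fuel start : Nat) (sh : List Int),
    start ≤ s.toList.length → s.toList.length - start < fuel →
    convertAltLoop s fuel start sh = sh ++ specOnes (s.toList.drop start) start := by
  intro fuel
  induction fuel with
  | zero => intro start sh _ h; omega
  | succ fuel ih =>
      intro start sh hle hfuel
      have hff := PySem.Chars.findFrom_natCast s.toList ['1'] start hle
      have hstr : ("1" : String).toList = ['1'] := by decide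
      by_cases hfind : PySem.Chars.find (s.toList.drop start) ['1'] = -1
      · have hF : PySem.Str.findFrom s "1" (start : Int) none = -1 := by
          rw [PySem.Str.findFrom_eq, hstr, hff, if_pos hfind]
        simp only [convertAltLoop, hF, if_true]
        have hnot : ¬ ['1'] <:+: s.toList.drop start :=
          (PySem.Chars.find_eq_neg_one_iff _ _).mp hfind
        have hmem : '1' ∉ s.toList.drop start := fun hm => hnot (mem_infix_single hm)
        rw [specOnes_of_no_one hmem, List.append_nil]
      · have hfn : (0 : Int) ≤ PySem.Chars.find (s.toList.drop start) ['1'] := by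
          have := PySem.Chars.neg_one_le_find (s.toList.drop start) ['1']
          omega
        set f := PySem.Chars.find (s.toList.drop start) ['1'] with hf
        have hF : PySem.Str.findFrom s "1" (start : Int) none = (start : Int) + f := by
          rw [PySem.Str.findFrom_eq, hstr, hff, if_neg hfind]
        have hspec := PySem.Chars.find_spec (s := s.toList.drop start) (sub := ['1']) hfn
        obtain ⟨hpre, hmin⟩ := hspec
        rw [← hf] at hpre hmin
        have hjf : f = (f.toNat : Int) := (Int.toNat_of_nonneg hfn).symm
        have hlt : start + f.toNat < s.toList.length := by
          by_contra hge
          have hnil : (s.toList.drop start).drop f.toNat = [] := by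
            rw [List.drop_drop]
            exact List.drop_eq_nil_of_le (by omega)
          rw [hnil] at hpre
          simp at hpre
        simp only [convertAltLoop, hF]
        rw [if_neg (by omega)]
        have htoNat : ((start : Int) + f).toNat = start + f.toNat := by omega
        rw [htoNat, ih (start + f.toNat + 1) (sh ++ [(start : Int) + f]) (by omega) (by omega)]
        rw [specOnes_split (s.toList.drop start) f.toNat (start : Int) hpre hmin]
        have hd2 : (s.toList.drop start).drop (f.toNat + 1) = s.toList.drop (start + f.toNat + 1) := by
          rw [List.drop_drop]
          congr 1
        rw [hd2]
        have hc1 : ((start + f.toNat + 1 : Nat) : Int) = (start : Int) + f.toNat + 1 := by push_cast; ring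
        rw [hc1, ← hjf]
        simp

theorem convert_spec : Claim_equal_convert := by
  intro number hdom
  unfold Spec_convert convert convert_alt
  rw [aFold number.toList 0 [], bLoop_eq number (number.toList.length + 1) 0 []
    (Nat.zero_le _) (by omega)]
  simp
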